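-- pv_equiv track=rewrite | github.com/Jimenagrg/Tema-1-Repaso-de-Python | Ej_3.py | clasificar_numeros
-- ===== SOURCE A (Python) =====
-- def clasificar_numeros(lista):
--     pares = []
--     impares = []
--     negativos = []
--
--     for num in lista:
--         if num < 0:
--             negativos.append(num)
--         if num % 2 == 0:
--             pares.append(num)
--         else:
--             impares.append(num)
--
--     return pares, impares, negativos
-- ===== SOURCE B (Python) =====
-- def clasificar_numeros(lista):
--     pares = [num for num in lista if num % 2 == 0]
--     impares = [num for num in lista if num % 2 != 0]
--     negativos = [num for num in lista if num < 0]
--     return pares, impares, negativos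
-- ===== Notes on version B (the rewrite author's own statement) =====
-- stated objective: simpler
-- what changed: Replaces the single accumulating loop over three mutable lists with three independent filtering comprehensions, one per output list.
import Mathlib
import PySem

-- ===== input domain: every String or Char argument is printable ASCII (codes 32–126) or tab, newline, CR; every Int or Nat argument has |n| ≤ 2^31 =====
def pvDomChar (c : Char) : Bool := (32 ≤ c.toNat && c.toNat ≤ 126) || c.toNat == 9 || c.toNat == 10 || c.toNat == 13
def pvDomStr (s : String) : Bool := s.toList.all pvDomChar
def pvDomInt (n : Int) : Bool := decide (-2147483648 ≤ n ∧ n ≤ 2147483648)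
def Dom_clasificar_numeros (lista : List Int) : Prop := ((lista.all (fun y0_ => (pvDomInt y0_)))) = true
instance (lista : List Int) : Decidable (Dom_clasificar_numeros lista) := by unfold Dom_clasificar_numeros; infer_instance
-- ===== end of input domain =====

-- B replaces A's single accumulating loop with three independent filtering passes (objective: simpler).


-- ===== PORT A =====
-- the loop body: appends num to negativos if num < 0, then to pares or impares by parity
def clasificarStep (st : List Int × List Int × List Int) (num : Int) :
    List Int × List Int × List Int :=
  let (pares, impares, negativos) := st
  let negativos := if num < 0 then negativos ++ [num] else negativos
  if PySem.Int.mod num 2 == 0 then (pares ++ [num], impares, negativos)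
  else (pares, impares ++ [num], negativos)

def clasificar_numeros (lista : List Int) : List Int × List Int × List Int :=
  lista.foldl clasificarStep ([], [], [])

-- ===== PORT B =====
def clasificar_numeros_alt (lista : List Int) : List Int × List Int × List Int :=
  (lista.filter (fun num => PySem.Int.mod num 2 == 0),
   lista.filter (fun num => PySem.Int.mod num 2 != 0),
   lista.filter (fun num => num < 0))

-- ===== PRECONDITION & SPEC =====
def Spec_clasificar_numeros (lista : List Int) (out : List Int × List Int × List Int) : Prop := out = clasificar_numeros_alt lista
instance (lista : List Int) (out : List Int × List Int × List Int) : Decidable (Spec_clasificar_numeros lista out) := by unfold Spec_clasificar_numeros; infer_instance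

-- ===== CLAIM (what is proved, stated in full; the proofs are below) =====
def Claim_equal_clasificar_numeros : Prop := ∀ (lista : List Int), Dom_clasificar_numeros lista → Spec_clasificar_numeros lista (clasificar_numeros lista)

-- ===== LEMMAS AND PROOFS =====
theorem clasificar_loop (lista p i n : List Int) :
    lista.foldl clasificarStep (p, i, n) =
      (p ++ lista.filter (fun num => PySem.Int.mod num 2 == 0),
       i ++ lista.filter (fun num => PySem.Int.mod num 2 != 0),
       n ++ lista.filter (fun num => num < 0)) := by
  induction lista generalizing p i n with
  | nil => simp
  | cons x xs ih =>
    simp only [List.foldl_cons, clasificarStep, List.filter_cons]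
    have hmod : (PySem.Int.mod x 2 == 0) = decide (2 ∣ x) := by
      by_cases h : 2 ∣ x <;>
        simp [h, PySem.Int.mod_eq_zero_iff_dvd]
    rw [hmod]
    by_cases hpar : 2 ∣ x <;>
      by_cases hneg : x < 0 <;>
        simp [hpar, hneg, ih]

-- ===== VERDICT (by name: the statement is the Claim_ definition above) =====
theorem clasificar_numeros_spec : Claim_equal_clasificar_numeros := by
  intro lista _
  show clasificar_numeros lista = clasificar_numeros_alt lista
  simp [clasificar_numeros, clasificar_numeros_alt, clasificar_loop]
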